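-- pv_equiv track=rewrite | github.com/lofues/- | 1.栈和队列/单调栈.py | parse_simple
-- ===== SOURCE A (Python) =====
-- def parse_simple(arr : list):
--     ret = []
--     for i,val in enumerate(arr):
--         left_index = -1
--         right_index = -1
--         cur_index = i - 1
--         while cur_index >= 0 :
--             if arr[cur_index] < arr[i]:
--                 left_index = cur_index
--                 break
--             cur_index -= 1
--         cur_index = i + 1
--         while cur_index <= len(arr) - 1:
--             if arr[cur_index] < arr[i]:
--                 right_index = cur_index
--                 break
--             cur_index += 1
--         ret.append((left_index,right_index))
--     return ret
-- ===== SOURCE B (Python) =====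
-- def _nearest_smaller(arr, order):
--     # monotonic stack pass: for each i in order, index of last previously
--     # visited j with arr[j] < arr[i], else -1
--     stack, out = [], []
--     for i in order:
--         while stack and arr[stack[-1]] >= arr[i]:
--             stack.pop()
--         out.append(stack[-1] if stack else -1)
--         stack.append(i)
--     return out
--
-- def parse_simple(arr: list):
--     n = len(arr)
--     left = _nearest_smaller(arr, range(n))
--     right = _nearest_smaller(arr, range(n - 1, -1, -1))
--     right.reverse()
--     return list(zip(left, right))
-- ===== Notes on version B (the rewrite author's own statement) =====
-- stated objective: faster
-- what changed: Replaces the per-element linear scans to the left and right with two monotonic-stack passes (forward and backward), each amortized O(1) per element.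
import Mathlib
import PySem

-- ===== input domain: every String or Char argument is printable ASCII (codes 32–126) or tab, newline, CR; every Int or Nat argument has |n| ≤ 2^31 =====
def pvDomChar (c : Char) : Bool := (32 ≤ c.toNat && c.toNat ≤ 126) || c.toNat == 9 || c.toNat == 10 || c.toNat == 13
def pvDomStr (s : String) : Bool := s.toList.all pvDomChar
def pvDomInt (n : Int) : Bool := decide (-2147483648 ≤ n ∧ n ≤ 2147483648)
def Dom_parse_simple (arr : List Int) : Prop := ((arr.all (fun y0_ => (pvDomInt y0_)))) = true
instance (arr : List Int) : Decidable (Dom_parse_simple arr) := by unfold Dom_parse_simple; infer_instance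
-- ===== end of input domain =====

-- B replaces A's per-element left/right linear scans by two monotonic-stack passes (objective: faster; asymptotic O(n) vs O(n^2)).


-- ===== PORT A =====
-- A's first while loop: cur_index runs i-1, i-2, …, 0; every access arr[cur_index]
-- has 0 ≤ cur_index < len(arr), so List.getD is exact here.
def scanL (arr : List Int) (v : Int) : Nat → Int
  | 0 => if arr.getD 0 0 < v then 0 else -1
  | (j+1) => if arr.getD (j+1) 0 < v then ((j : Int) + 1) else scanL arr v j

-- A's second while loop: cur_index runs i+1, i+2, … while cur_index ≤ len(arr)-1.
def scanR (arr : List Int) (v : Int) (j : Nat) : Int :=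
  if h : j < arr.length then
    if arr.getD j 0 < v then (j : Int) else scanR arr v (j+1)
  else -1
termination_by arr.length - j
decreasing_by omega

def parse_simple (arr : List Int) : List (Int × Int) :=
  (PySem.List.enumerate arr).foldl (fun ret iv =>
    let i : Int := iv.1
    let val : Int := iv.2
    -- while cur_index >= 0 (cur_index starts at i-1): i from enumerate is ≥ 0
    let left_index : Int := if i - 1 < 0 then -1 else scanL arr val (i - 1).toNat
    let right_index : Int := scanR arr val (i + 1).toNat
    ret ++ [(left_index, right_index)]) []

-- ===== PORT B =====
-- one step of _nearest_smaller's for-loop: pop while top's value ≥ arr[i],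
-- record answer, push i (stack head = Python stack top)
def nsStep (arr : List Int) (s : List Nat × List Int) (i : Nat) : List Nat × List Int :=
  let st := s.1.dropWhile (fun j => decide (arr.getD i 0 ≤ arr.getD j 0))
  (i :: st, s.2 ++ [match st with | [] => -1 | j :: _ => (j : Int)])

def nsPass (arr : List Int) (order : List Nat) : List Int :=
  (order.foldl (nsStep arr) ([], [])).2

def parse_simple_alt (arr : List Int) : List (Int × Int) :=
  let n := arr.length
  let left := nsPass arr (List.range n)
  let right := (nsPass arr (List.range n).reverse).reverse
  left.zip right

-- ===== PRECONDITION & SPEC =====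
def Spec_parse_simple (arr : List Int) (out : List (Int × Int)) : Prop := out = parse_simple_alt arr
instance (arr : List Int) (out : List (Int × Int)) : Decidable (Spec_parse_simple arr out) := by unfold Spec_parse_simple; infer_instance

-- ===== CLAIM (what is proved, stated in full; the proofs are below) =====
def Claim_equal_parse_simple : Prop := ∀ (arr : List Int), Dom_parse_simple arr → Spec_parse_simple arr (parse_simple arr)

-- ===== LEMMAS AND PROOFS =====

-- abbreviation used throughout the proofs
def aGet (arr : List Int) (j : Nat) : Int := arr.getD j 0

-- A's per-index answers
def AL (arr : List Int) (i : Nat) : Int :=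
  if i = 0 then -1 else scanL arr (aGet arr i) (i - 1)
def AR (arr : List Int) (i : Nat) : Int := scanR arr (aGet arr i) (i + 1)

-- B's stack state after processing indices 0,1,…,i-1 (forward pass)
def stk (arr : List Int) : Nat → List Nat
  | 0 => []
  | (i+1) => i :: (stk arr i).dropWhile (fun j => decide (aGet arr i ≤ aGet arr j))

-- answer read off a stack state
def ansOf (arr : List Int) (st : List Nat) (i : Nat) : Int :=
  match st.dropWhile (fun j => decide (aGet arr i ≤ aGet arr j)) with
  | [] => -1
  | j :: _ => (j : Int)

-- the list of answers of a pass starting from stack st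
def ansList (arr : List Int) (st : List Nat) : List Nat → List Int
  | [] => []
  | i :: ord => ansOf arr st i ::
      ansList arr (i :: st.dropWhile (fun j => decide (aGet arr i ≤ aGet arr j))) ord

theorem nsFold_spec (arr : List Int) (ord : List Nat) :
    ∀ st out, ord.foldl (nsStep arr) (st, out) =
      (ord.foldl (fun s i => i :: s.dropWhile (fun j => decide (aGet arr i ≤ aGet arr j))) st,
       out ++ ansList arr st ord) := by
  intro st out
  induction ord generalizing st out with
  | nil => simp [ansList]
  | cons i ord ih =>
      simp only [List.foldl_cons, ansList, nsStep]
      rw [ih]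
      rw [List.append_cons out]
      simp only [ansOf, aGet, List.append_assoc, List.append_nil, List.singleton_append]
      rfl

theorem nsPass_eq_ansList (arr : List Int) (ord : List Nat) :
    nsPass arr ord = ansList arr [] ord := by
  simp [nsPass, nsFold_spec]

-- the "good" indices: exactly those on the stack
def Good (arr : List Int) (i j : Nat) : Prop :=
  j < i ∧ ∀ k, j < k → k < i → aGet arr j < aGet arr k

theorem dropWhile_eq_filter_of_pairwise {α : Type} (p : α → Bool) :
    ∀ (l : List α), l.Pairwise (fun x y => p x = false → p y = false) →
      l.dropWhile p = l.filter (fun x => !p x) := by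
  intro l hl
  induction l with
  | nil => simp
  | cons x l ih =>
      rcases List.pairwise_cons.mp hl with ⟨hx, hl'⟩
      by_cases hpx : p x = true
      · simp [List.dropWhile, List.filter, hpx, ih hl']
      · simp only [Bool.not_eq_true] at hpx
        have : ∀ y ∈ l, p y = false := fun y hy => hx y hy hpx
        have hfl : List.filter (fun x => !p x) l = l :=
          List.filter_eq_self.mpr (by intro y hy; simp [this y hy])
        simp [List.dropWhile, List.filter, hpx, hfl]

theorem dw_filter_aux (arr : List Int) (i : Nat) (l : List Nat)
    (hp : l.Pairwise (· > ·))
    (hmem : ∀ j ∈ l, ∀ k, j < k → k < i → aGet arr j < aGet arr k)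
    (hlt : ∀ j ∈ l, j < i) :
    l.dropWhile (fun j => decide (aGet arr i ≤ aGet arr j))
      = l.filter (fun j => decide (aGet arr j < aGet arr i)) := by
  have h := dropWhile_eq_filter_of_pairwise (fun j => decide (aGet arr i ≤ aGet arr j)) l ?_
  · rw [h]
    apply List.filter_congr
    intro x _
    simp only [← decide_not, Int.not_le]
  · refine hp.imp_of_mem ?_
    intro x y hx hy hxy
    simp only [decide_eq_false_iff_not, not_le]
    intro hxlt
    have hyx : aGet arr y < aGet arr x := hmem y hy x hxy (hlt x hx)
    omega

theorem stk_inv (arr : List Int) (i : Nat) :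
    (stk arr i).Pairwise (· > ·) ∧ (∀ j, j ∈ stk arr i ↔ Good arr i j) := by
  induction i with
  | zero =>
      constructor
      · simp [stk]
      · intro j; simp [stk, Good]
  | succ i ih =>
      obtain ⟨hp, hmem⟩ := ih
      have hlt : ∀ j ∈ stk arr i, j < i := fun j hj => ((hmem j).mp hj).1
      have hmem' : ∀ j ∈ stk arr i, ∀ k, j < k → k < i → aGet arr j < aGet arr k :=
        fun j hj k hk hk' => ((hmem j).mp hj).2 k hk hk'
      have hdw := dw_filter_aux arr i (stk arr i) hp hmem' hlt
      have hstk : stk arr (i+1)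
          = i :: (stk arr i).filter (fun j => decide (aGet arr j < aGet arr i)) := by
        rw [show stk arr (i+1)
              = i :: (stk arr i).dropWhile (fun j => decide (aGet arr i ≤ aGet arr j)) from rfl,
            hdw]
      constructor
      · rw [hstk]
        refine List.pairwise_cons.mpr ⟨?_, hp.filter _⟩
        intro x hx
        exact hlt x (List.mem_of_mem_filter hx)
      · intro j
        rw [hstk]
        simp only [List.mem_cons, List.mem_filter, decide_eq_true_eq]
        constructor
        · rintro (rfl | ⟨hj, hval⟩)
          · exact ⟨Nat.lt_succ_self _, fun k hk hk' => absurd hk' (by omega)⟩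
          · obtain ⟨hji, hgood⟩ := (hmem j).mp hj
            refine ⟨by omega, fun k hk hk' => ?_⟩
            rcases Nat.lt_or_ge k i with h1 | h1
            · exact hgood k hk h1
            · have : k = i := by omega
              subst this; exact hval
        · rintro ⟨hji, hgood⟩
          rcases Nat.lt_or_ge j i with h1 | h1
          · right
            refine ⟨(hmem j).mpr ⟨h1, fun k hk hk' => hgood k hk (by omega)⟩, ?_⟩
            exact hgood i h1 (Nat.lt_succ_self _)
          · left; omega

theorem scanL_none (arr : List Int) (v : Int) (j : Nat)
    (h : ∀ k, k ≤ j → ¬ aGet arr k < v) : scanL arr v j = -1 := by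
  induction j with
  | zero =>
      have h0 := h 0 (le_refl 0)
      simp only [scanL]
      rw [if_neg (by simpa [aGet] using h0)]
  | succ j ih =>
      have h1 := h (j+1) (le_refl _)
      simp only [scanL]
      rw [if_neg (by simpa [aGet] using h1)]
      exact ih (fun k hk => h k (Nat.le_succ_of_le hk))

theorem scanL_found (arr : List Int) (v : Int) (j m : Nat)
    (hm : m ≤ j) (hv : aGet arr m < v) (hmax : ∀ k, m < k → k ≤ j → ¬ aGet arr k < v) :
    scanL arr v j = (m : Int) := by
  induction j with
  | zero =>
      have hm0 : m = 0 := Nat.le_zero.mp hm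
      subst hm0
      simp only [scanL]
      rw [if_pos (by simpa [aGet] using hv)]
      norm_num
  | succ j ih =>
      rcases Nat.lt_or_ge m (j+1) with hlt | hge
      · have hnot := hmax (j+1) hlt (le_refl _)
        simp only [scanL]
        rw [if_neg (by simpa [aGet] using hnot)]
        exact ih (Nat.lt_succ_iff.mp hlt) (fun k hk hk' => hmax k hk (Nat.le_succ_of_le hk'))
      · have hm' : m = j+1 := le_antisymm hm hge
        subst hm'
        simp only [scanL]
        rw [if_pos (by simpa [aGet] using hv)]
        push_cast; ring

theorem findGreatest_in_stk (arr : List Int) (i k : Nat)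
    (hk : k < i) (hPk : aGet arr k < aGet arr i) :
    Nat.findGreatest (fun k => aGet arr k < aGet arr i) (i-1) ∈ stk arr i ∧
    aGet arr (Nat.findGreatest (fun k => aGet arr k < aGet arr i) (i-1)) < aGet arr i ∧
    k ≤ Nat.findGreatest (fun k => aGet arr k < aGet arr i) (i-1) := by
  obtain ⟨hp, hmem⟩ := stk_inv arr i
  have hle := Nat.findGreatest_le (P := fun k => aGet arr k < aGet arr i) (n := i-1)
  have hspec : aGet arr (Nat.findGreatest (fun k => aGet arr k < aGet arr i) (i-1)) < aGet arr i :=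
    Nat.findGreatest_spec (P := fun k => aGet arr k < aGet arr i) (m := k) (show k ≤ i - 1 by omega) hPk
  refine ⟨(hmem _).mpr ⟨by omega, ?_⟩, hspec, Nat.le_findGreatest (show k ≤ i-1 by omega) hPk⟩
  intro k' h1 h2
  have hnot : ¬ aGet arr k' < aGet arr i := Nat.findGreatest_is_greatest h1 (by omega)
  omega

theorem ansOf_stk (arr : List Int) (i : Nat) :
    ansOf arr (stk arr i) i = AL arr i := by
  obtain ⟨hp, hmem⟩ := stk_inv arr i
  have hlt : ∀ j ∈ stk arr i, j < i := fun j hj => ((hmem j).mp hj).1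
  have hmem' : ∀ j ∈ stk arr i, ∀ k, j < k → k < i → aGet arr j < aGet arr k :=
    fun j hj k hk hk' => ((hmem j).mp hj).2 k hk hk'
  have hdw := dw_filter_aux arr i (stk arr i) hp hmem' hlt
  rw [ansOf, hdw]
  cases hF : (stk arr i).filter (fun j => decide (aGet arr j < aGet arr i)) with
  | nil =>
      have hnone : ∀ k, k < i → ¬ aGet arr k < aGet arr i := by
        intro k hk hPk
        obtain ⟨hKstk, hKval, _⟩ := findGreatest_in_stk arr i k hk hPk
        have : Nat.findGreatest (fun k => aGet arr k < aGet arr i) (i-1) ∈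
            (stk arr i).filter (fun j => decide (aGet arr j < aGet arr i)) :=
          List.mem_filter.mpr ⟨hKstk, by simpa using hKval⟩
        rw [hF] at this
        simp at this
      rcases (show i = 0 ∨ i ≠ 0 by omega) with rfl | hne
      · simp [AL]
      · rw [AL, if_neg hne, scanL_none arr _ (i-1) (fun k hk => hnone k (by omega))]
  | cons m rest =>
      have hmmem : m ∈ (stk arr i).filter (fun j => decide (aGet arr j < aGet arr i)) := by
        rw [hF]; exact List.mem_cons_self
      obtain ⟨hmstk, hmval⟩ := List.mem_filter.mp hmmem
      have hmval : aGet arr m < aGet arr i := by simpa using hmval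
      have hmi : m < i := hlt m hmstk
      have hne : i ≠ 0 := by omega
      have hfp : ((stk arr i).filter
          (fun j => decide (aGet arr j < aGet arr i))).Pairwise (· > ·) := hp.filter _
      rw [hF] at hfp
      have hrest : ∀ x ∈ rest, m > x := (List.pairwise_cons.mp hfp).1
      have hmax : ∀ k, m < k → k ≤ i - 1 → ¬ aGet arr k < aGet arr i := by
        intro k hk hk' hPk
        obtain ⟨hKstk, hKval, hKge⟩ := findGreatest_in_stk arr i k (by omega) hPk
        have hKf : Nat.findGreatest (fun k => aGet arr k < aGet arr i) (i-1) ∈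
            (stk arr i).filter (fun j => decide (aGet arr j < aGet arr i)) :=
          List.mem_filter.mpr ⟨hKstk, by simpa using hKval⟩
        rw [hF] at hKf
        rcases List.mem_cons.mp hKf with heq | hmem2
        · omega
        · have := hrest _ hmem2; omega
      rw [AL, if_neg hne, scanL_found arr _ (i-1) m (by omega) hmval hmax]

theorem ansList_range' (arr : List Int) :
    ∀ (m i : Nat), ansList arr (stk arr i) (List.range' i m) =
      (List.range' i m).map (AL arr) := by
  intro m
  induction m with
  | zero => intro i; simp [ansList]
  | succ m ih =>
      intro i
      rw [List.range'_succ]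
      simp only [ansList, List.map_cons]
      rw [ansOf_stk arr i]
      rw [show (i :: List.dropWhile (fun j => decide (aGet arr i ≤ aGet arr j)) (stk arr i))
            = stk arr (i+1) from rfl]
      rw [ih (i+1)]


theorem left_correct (arr : List Int) :
    nsPass arr (List.range arr.length) = (List.range arr.length).map (AL arr) := by
  rw [nsPass_eq_ansList, List.range_eq_range']
  exact ansList_range' arr arr.length 0

-- ===== right pass: mirror symmetry =====

def psiN (n : Nat) (x : Int) : Int := if x < 0 then x else (n : Int) - 1 - x

theorem aGet_reverse (arr : List Int) (j : Nat) (h : j < arr.length) :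
    aGet arr.reverse j = aGet arr (arr.length - 1 - j) := by
  simp only [aGet, List.getD_eq_getElem?_getD]
  rw [List.getElem?_eq_getElem (by simpa using h),
      List.getElem?_eq_getElem (by omega),
      List.getElem_reverse]

theorem dropWhile_congr' {α : Type} (p q : α → Bool) :
    ∀ (l : List α), (∀ x ∈ l, p x = q x) → l.dropWhile p = l.dropWhile q := by
  intro l
  induction l with
  | nil => intro _; rfl
  | cons x l ih =>
      intro h
      simp only [List.dropWhile, h x List.mem_cons_self]
      cases q x
      · rfl
      · exact ih (fun y hy => h y (List.mem_cons_of_mem x hy))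

theorem scanR_eq (arr : List Int) (v : Int) :
    ∀ (k j : Nat), j < arr.length → arr.length - 1 - j = k →
      scanR arr v j = psiN arr.length (scanL arr.reverse v k) := by
  intro k
  induction k with
  | zero =>
      intro j hj hk
      have hj' : j = arr.length - 1 := by omega
      rw [scanR, dif_pos hj]
      have hrev : aGet arr.reverse 0 = aGet arr j := by
        rw [aGet_reverse arr 0 (by omega)]; congr 1; omega
      by_cases hv : arr.getD j 0 < v
      · rw [if_pos hv]
        simp only [scanL]
        rw [if_pos (by rw [show arr.reverse.getD 0 0 = arr.getD j 0 from hrev]; exact hv)]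
        simp only [psiN]
        rw [if_neg (by omega)]
        omega
      · rw [if_neg hv]
        rw [scanR, dif_neg (by omega)]
        simp only [scanL]
        rw [if_neg (by rw [show arr.reverse.getD 0 0 = arr.getD j 0 from hrev]; exact hv)]
        norm_num [psiN]
  | succ k ih =>
      intro j hj hk
      rw [scanR, dif_pos hj]
      have hrev : aGet arr.reverse (k+1) = aGet arr j := by
        rw [aGet_reverse arr (k+1) (by omega)]; congr 1; omega
      by_cases hv : arr.getD j 0 < v
      · rw [if_pos hv]
        simp only [scanL]
        rw [if_pos (by rw [show arr.reverse.getD (k+1) 0 = arr.getD j 0 from hrev]; exact hv)]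
        simp only [psiN]
        rw [if_neg (by omega)]
        omega
      · rw [if_neg hv]
        simp only [scanL]
        rw [if_neg (by rw [show arr.reverse.getD (k+1) 0 = arr.getD j 0 from hrev]; exact hv)]
        exact ih (j+1) (by omega) (by omega)

theorem ansList_rev (arr : List Int) :
    ∀ (ord st : List Nat), (∀ j ∈ ord, j < arr.length) → (∀ j ∈ st, j < arr.length) →
      ansList arr (st.map (fun j => arr.length - 1 - j))
          (ord.map (fun j => arr.length - 1 - j))
        = (ansList arr.reverse st ord).map (psiN arr.length) := by
  intro ord
  induction ord with
  | nil => intro st _ _; rfl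
  | cons i ord ih =>
      intro st hord hst
      have hi : i < arr.length := hord i List.mem_cons_self
      have hdw :
          (st.map (fun j => arr.length - 1 - j)).dropWhile
              (fun j => decide (aGet arr (arr.length - 1 - i) ≤ aGet arr j))
            = (st.dropWhile
                (fun j => decide (aGet arr.reverse i ≤ aGet arr.reverse j))).map
                (fun j => arr.length - 1 - j) := by
        rw [List.dropWhile_map]
        congr 1
        apply dropWhile_congr'
        intro x hx
        have hx' : x < arr.length := hst x hx
        simp only [Function.comp]
        rw [aGet_reverse arr i hi, aGet_reverse arr x hx']
      simp only [List.map_cons, ansList]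
      congr 1
      · -- heads
        rw [ansOf, ansOf, hdw]
        cases hC : st.dropWhile (fun j => decide (aGet arr.reverse i ≤ aGet arr.reverse j)) with
        | nil => simp [psiN]
        | cons m rest =>
            have hm : m < arr.length := by
              have : m ∈ st := (List.dropWhile_sublist _).mem (by rw [hC]; exact List.mem_cons_self)
              exact hst m this
            simp only [List.map_cons, psiN]
            rw [if_neg (by omega)]
            omega
      · -- tails
        have := ih (i :: st.dropWhile (fun j => decide (aGet arr.reverse i ≤ aGet arr.reverse j)))
          (fun j hj => hord j (List.mem_cons_of_mem i hj)) ?_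
        · rw [← this]
          simp only [List.map_cons]
          rw [hdw]
        · intro j hj
          rcases List.mem_cons.mp hj with rfl | hj'
          · exact hi
          · exact hst j ((List.dropWhile_sublist _).mem hj')

theorem reverse_range (n : Nat) :
    (List.range n).reverse = (List.range n).map (fun i => n - 1 - i) := by
  apply List.ext_getElem <;> simp

theorem right_correct (arr : List Int) :
    (nsPass arr (List.range arr.length).reverse).reverse
      = (List.range arr.length).map (AR arr) := by
  rw [reverse_range, nsPass_eq_ansList]
  rw [show ([] : List Nat) = ([] : List Nat).map (fun j => arr.length - 1 - j) from rfl]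
  rw [ansList_rev arr (List.range arr.length) [] (by simp) (by simp)]
  have hL : ansList arr.reverse [] (List.range arr.length)
      = (List.range arr.length).map (AL arr.reverse) := by
    rw [← nsPass_eq_ansList, ← List.length_reverse (as := arr), left_correct]
  rw [hL, List.map_map, ← List.map_reverse, reverse_range, List.map_map]
  apply List.map_congr_left
  intro i hi
  have hi' : i < arr.length := List.mem_range.mp hi
  simp only [Function.comp]
  rcases Nat.lt_or_ge i (arr.length - 1) with hlt | hge
  · -- i < n-1 : the reversed index is nonzero
    have hne : arr.length - 1 - i ≠ 0 := by omega
    rw [AL, if_neg hne, AR]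
    have hval : aGet arr.reverse (arr.length - 1 - i) = aGet arr i := by
      rw [aGet_reverse arr _ (by omega)]; congr 1; omega
    rw [hval]
    rw [scanR_eq arr (aGet arr i) (arr.length - 1 - i - 1) (i+1) (by omega) (by omega)]
  · -- i = n-1 : reversed index is 0, both sides are -1
    have : i = arr.length - 1 := by omega
    subst this
    rw [AL, if_pos (by omega), AR]
    rw [scanR, dif_neg (by omega)]
    simp [psiN]

-- ===== assembly =====

theorem foldl_append_map {α β : Type} (f : α → β) :
    ∀ (l : List α) (acc : List β),
      l.foldl (fun r x => r ++ [f x]) acc = acc ++ l.map f := by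
  intro l
  induction l with
  | nil => intro acc; simp
  | cons x l ih => intro acc; simp [ih]

theorem parse_simple_eq_map (arr : List Int) :
    parse_simple arr = (List.range arr.length).map (fun i => (AL arr i, AR arr i)) := by
  rw [parse_simple, foldl_append_map]
  rw [List.nil_append]
  apply List.ext_getElem
  · simp [PySem.List.length_enumerate]
  · intro k h1 h2
    simp only [List.getElem_map, PySem.List.getElem_enumerate, List.getElem_range]
    have hk : k < arr.length := by simpa using h2
    have harr : arr[k] = aGet arr k := by
      simp [aGet, List.getD_eq_getElem?_getD, List.getElem?_eq_getElem hk]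
    simp only [Prod.mk.injEq]
    refine ⟨?_, ?_⟩
    · -- left components
      rcases Nat.eq_zero_or_pos k with rfl | hpos
      · norm_num [AL]
      · rw [if_neg (by omega)]
        rw [AL, if_neg (by omega), harr]
        congr 1
        omega
    · -- right components
      rw [AR, harr]
      congr 1
      omega

theorem parse_simple_alt_eq_map (arr : List Int) :
    parse_simple_alt arr = (List.range arr.length).map (fun i => (AL arr i, AR arr i)) := by
  simp only [parse_simple_alt]
  rw [left_correct, right_correct, List.zip_map']

-- ===== VERDICT (by name: the statement is the Claim_ definition above) =====
theorem parse_simple_spec : Claim_equal_parse_simple := by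
  intro arr _
  unfold Spec_parse_simple
  rw [parse_simple_eq_map, parse_simple_alt_eq_map]
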